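-- pv_equiv track=rewrite | github.com/minkaas/AdventOfCode_2 | 2023/Day21/Day21.py | parse
-- ===== SOURCE A (Python) =====
-- def parse(puzzle_input):
--     values = puzzle_input.split("\n")
--     data = []
--     start = (0, 0)
--     x = 0
--     for value in values:
--         to_add = []
--         for i in range(len(value)):
--             if value[i] == 'S':
--                 to_add.append(False)
--                 start = (x, i)
--             elif value[i] == '.':
--                 to_add.append(False)
--             else:
--                 to_add.append(True)
--         data.append(to_add)
--         x += 1
--     return data, start
-- ===== SOURCE B (Python) =====
-- def parse(puzzle_input):
--     lines = puzzle_input.split("\n")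
--     data = [[c not in '.S' for c in line] for line in lines]
--     start = (0, 0)
--     for x, line in enumerate(lines):
--         i = line.rfind('S')
--         if i != -1:
--             start = (x, i)
--     return data, start
-- ===== Notes on version B (the rewrite author's own statement) =====
-- stated objective: faster
-- what changed: Replaces A's single nested index loop that interleaves per-character cell-building with start-detection by two separate passes: a list comprehension building the bool matrix and a per-line rfind scan for the start position; the comprehension and C-implemented rfind avoid per-character Python bytecode.
import Mathlib
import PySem

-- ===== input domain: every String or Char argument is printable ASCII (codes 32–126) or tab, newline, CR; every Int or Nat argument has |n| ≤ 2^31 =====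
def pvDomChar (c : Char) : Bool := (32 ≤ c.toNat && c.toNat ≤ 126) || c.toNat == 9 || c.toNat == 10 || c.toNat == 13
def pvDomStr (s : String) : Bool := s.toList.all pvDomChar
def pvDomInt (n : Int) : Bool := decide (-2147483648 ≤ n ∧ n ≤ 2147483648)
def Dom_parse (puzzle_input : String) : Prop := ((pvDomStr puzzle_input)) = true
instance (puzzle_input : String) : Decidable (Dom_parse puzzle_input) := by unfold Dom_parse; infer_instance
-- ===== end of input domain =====

-- B replaces A's single nested detect-and-build loop by two separate passes (matrix comprehension + per-line rfind scan for the start); same result, simpler decomposition.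


-- ===== PORT A =====
-- inner loop of A: for i in range(len(value)): … (builds to_add and may update start)
def parseRowA (x : Int) (value : List Char) (start : Int × Int) : List Bool × (Int × Int) :=
  (PySem.List.pyRange 0 (PySem.Chars.len value)).foldl
    (fun (acc : List Bool × (Int × Int)) i =>
      if PySem.List.pyGetD value i ' ' = 'S' then (acc.1 ++ [false], (x, i))
      else if PySem.List.pyGetD value i ' ' = '.' then (acc.1 ++ [false], acc.2)
      else (acc.1 ++ [true], acc.2))
    ([], start)

def parse (puzzle_input : String) : List (List Bool) × (Int × Int) :=
  let values := PySem.Chars.splitOn puzzle_input.toList ['\n']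
  let r := values.foldl
    (fun (st : List (List Bool) × ((Int × Int) × Int)) value =>
      let ta := parseRowA st.2.2 value st.2.1
      (st.1 ++ [ta.1], (ta.2, st.2.2 + 1)))
    ([], ((0, 0), 0))
  (r.1, r.2.1)

-- ===== PORT B =====
def parse_alt (puzzle_input : String) : List (List Bool) × (Int × Int) :=
  let lines := PySem.Chars.splitOn puzzle_input.toList ['\n']
  let data := lines.map (fun line => line.map (fun c => !(c == '.' || c == 'S')))
  let start := (PySem.List.enumerate lines).foldl
    (fun (s : Int × Int) (p : Int × List Char) =>
      let i := PySem.Chars.rfind p.2 ['S']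
      if i = -1 then s else (p.1, i))
    (0, 0)
  (data, start)

-- ===== PRECONDITION & SPEC =====
def Spec_parse (puzzle_input : String) (out : List (List Bool) × (Int × Int)) : Prop := out = parse_alt puzzle_input
instance (puzzle_input : String) (out : List (List Bool) × (Int × Int)) : Decidable (Spec_parse puzzle_input out) := by unfold Spec_parse; infer_instance

-- ===== CLAIM (what is proved, stated in full; the proofs are below) =====
def Claim_equal_parse : Prop := ∀ (puzzle_input : String), Dom_parse puzzle_input → Spec_parse puzzle_input (parse puzzle_input)

-- ===== LEMMAS AND PROOFS =====

-- index of the LAST 'S' in a line, if any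
def lastS : List Char → Option Int
  | [] => none
  | c :: t =>
    match lastS t with
    | some j => some (j + 1)
    | none => if c = 'S' then some 0 else none

theorem lastS_nonneg : ∀ (v : List Char) (j : Int), lastS v = some j → 0 ≤ j := by
  intro v
  induction v with
  | nil => intro j h; simp [lastS] at h
  | cons c t ih =>
    intro j h
    simp only [lastS] at h
    cases hlt : lastS t with
    | some k => rw [hlt] at h; have := ih k hlt; simp at h; omega
    | none => rw [hlt] at h; split at h <;> simp_all

theorem lastS_append (l : List Char) (c : Char) :
    lastS (l ++ [c]) = if c = 'S' then some (l.length : Int) else lastS l := by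
  induction l with
  | nil => simp [lastS]
  | cons d t ih =>
    show (match lastS (t ++ [c]) with
          | some j => some (j + 1)
          | none => if d = 'S' then some (0 : Int) else none) = _
    rw [ih]
    by_cases hc : c = 'S'
    · simp only [if_pos hc, List.length_cons]
      push_cast; ring_nf
    · simp only [if_neg hc]
      rfl

-- rfind.go with a single-char needle finds the last 'S' among the first n+1 characters
theorem prefS_cons (a : Char) (l : List Char) :
    List.isPrefixOf ['S'] (a :: l) = (a == 'S') := by
  simp [List.isPrefixOf, Bool.beq_comm]

-- rfind.go with a single-char needle finds the last 'S' among the first n+1 characters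
theorem rfind_go_eq (v : List Char) : ∀ (n : Nat),
    PySem.Chars.rfind.go v ['S'] n = (lastS (v.take (n + 1))).getD (-1) := by
  intro n
  induction n with
  | zero =>
    cases v with
    | nil => simp [PySem.Chars.rfind.go, lastS, List.isPrefixOf]
    | cons c t =>
      simp only [PySem.Chars.rfind.go, List.take_succ_cons, List.take_zero]
      rw [prefS_cons]
      by_cases h : c = 'S' <;> simp [lastS, h]
  | succ n ih =>
    show (if List.isPrefixOf ['S'] (v.drop (n + 1)) then ((n + 1 : Nat) : Int)
          else PySem.Chars.rfind.go v ['S'] n) = _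
    by_cases hlen : n + 1 < v.length
    · have htake : v.take (n + 2) = v.take (n + 1) ++ [v[n + 1]] := by
        rw [← List.take_append_getElem]
      have hdrop : v.drop (n + 1) = v[n + 1] :: v.drop (n + 2) := by
        rw [List.drop_eq_getElem_cons hlen]
      rw [hdrop, prefS_cons, htake, lastS_append, List.length_take]
      have hmin : min (n + 1) v.length = n + 1 := by omega
      rw [hmin]
      by_cases hS : v[n + 1] = 'S'
      · simp [hS]
      · simp [hS, ih]
    · have hdrop : v.drop (n + 1) = [] := List.drop_eq_nil_of_le (by omega)
      have htake : v.take (n + 2) = v.take (n + 1) := by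
        rw [List.take_of_length_le (by omega), List.take_of_length_le (by omega)]
      rw [hdrop]
      simp [List.isPrefixOf, htake, ih]

theorem rfind_eq_lastS (v : List Char) :
    PySem.Chars.rfind v ['S'] = (lastS v).getD (-1) := by
  show PySem.Chars.rfind.go v ['S'] v.length = _
  rw [rfind_go_eq, List.take_of_length_le (by omega)]

-- the start-tracking half of A's inner loop computes the last 'S' index
theorem startA_fold (x : Int) : ∀ (v : List Char) (s : Int × Int),
    (PySem.List.pyRange 0 (PySem.Chars.len v)).foldl
      (fun (s : Int × Int) i => if PySem.List.pyGetD v i ' ' = 'S' then (x, i) else s) s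
    = (lastS v).elim s (fun j => (x, j)) := by
  intro v
  induction v using List.reverseRecOn with
  | nil => intro s; simp [PySem.Chars.len, PySem.List.pyRange_one_eq_nil, lastS]
  | append_singleton l c ih =>
    intro s
    have hlen : PySem.Chars.len (l ++ [c]) = (l.length : Int) + 1 := by
      simp [PySem.Chars.len]
    rw [hlen, PySem.List.pyRange_one_succ_right (by positivity), List.foldl_append]
    have hcong : (PySem.List.pyRange 0 (l.length : Int)).foldl
        (fun (s : Int × Int) i => if PySem.List.pyGetD (l ++ [c]) i ' ' = 'S' then (x, i) else s) s
      = (PySem.List.pyRange 0 (l.length : Int)).foldl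
        (fun (s : Int × Int) i => if PySem.List.pyGetD l i ' ' = 'S' then (x, i) else s) s := by
      apply PySem.List.foldl_congr_mem
      intro acc i hi
      have hmem := (PySem.List.mem_pyRange_one).1 hi
      have hgl : PySem.List.pyGetD (l ++ [c]) i ' ' = PySem.List.pyGetD l i ' ' := by
        have h0 := hmem.1
        have h1 := hmem.2
        rw [PySem.List.pyGetD_eq_getElem _ ' ' h0 (by simp; omega),
            PySem.List.pyGetD_eq_getElem _ ' ' h0 h1]
        exact List.getElem_append_left (by omega)
      rw [hgl]
    have hlast : PySem.List.pyGetD (l ++ [c]) (l.length : Int) ' ' = c := by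
      rw [PySem.List.pyGetD_eq_getElem _ ' ' (by positivity) (by simp)]
      simp
    have hlenl : PySem.Chars.len l = (l.length : Int) := by simp [PySem.Chars.len]
    rw [hcong, ← hlenl, ih, hlenl, List.foldl_cons, List.foldl_nil, hlast, lastS_append]
    by_cases hS : c = 'S'
    · cases h : lastS l <;> simp [hS]
    · cases h : lastS l <;> simp [hS]

-- A's inner loop = (B's row, last-'S' update of start)
theorem rowA_eq (x : Int) (v : List Char) (s : Int × Int) :
    parseRowA x v s
      = (v.map (fun c => !(c == '.' || c == 'S')), (lastS v).elim s (fun j => (x, j))) := by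
  unfold parseRowA
  have hstep : ∀ (acc : List Bool × (Int × Int)), ∀ i ∈ PySem.List.pyRange 0 (PySem.Chars.len v),
      (if PySem.List.pyGetD v i ' ' = 'S' then (acc.1 ++ [false], (x, i))
       else if PySem.List.pyGetD v i ' ' = '.' then (acc.1 ++ [false], acc.2)
       else (acc.1 ++ [true], acc.2))
    = (acc.1 ++ [!(PySem.List.pyGetD v i ' ' == '.' || PySem.List.pyGetD v i ' ' == 'S')],
       if PySem.List.pyGetD v i ' ' = 'S' then (x, i) else acc.2) := by
    intro acc i _
    by_cases h1 : PySem.List.pyGetD v i ' ' = 'S' <;> by_cases h2 : PySem.List.pyGetD v i ' ' = '.' <;>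
      simp [h1, h2]
  have hrw := PySem.List.foldl_congr_mem (PySem.List.pyRange 0 (PySem.Chars.len v)) _ _
      (([] : List Bool), s) hstep
  rw [hrw]
  rw [PySem.List.foldl_prod_mk
        (fun (r : List Bool) i => r ++ [!(PySem.List.pyGetD v i ' ' == '.' || PySem.List.pyGetD v i ' ' == 'S')])
        (fun (s : Int × Int) i => if PySem.List.pyGetD v i ' ' = 'S' then (x, i) else s)]
  rw [startA_fold]
  rw [PySem.List.foldl_append_singleton_eq_map]
  have hlen : PySem.Chars.len v = PySem.List.len v := rfl
  rw [hlen]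
  rw [show (fun i => !(PySem.List.pyGetD v i ' ' == '.' || PySem.List.pyGetD v i ' ' == 'S'))
        = ((fun c => !(c == '.' || c == 'S')) ∘ (fun i => PySem.List.pyGetD v i ' ')) from rfl]
  rw [← List.map_map, PySem.List.map_pyGetD_pyRange_zero, List.nil_append]

-- B's per-line start step = last-'S' update
theorem stepB_eq (x : Int) (v : List Char) (s : Int × Int) :
    (let i := PySem.Chars.rfind v ['S']; if i = -1 then s else (x, i))
      = (lastS v).elim s (fun j => (x, j)) := by
  rw [rfind_eq_lastS]
  cases h : lastS v with
  | none => simp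
  | some j =>
    have := lastS_nonneg v j h
    simp only [Option.getD_some, Option.elim_some]
    rw [if_neg (by omega)]

-- the whole outer loop of A against B's two passes
theorem outer_fold (lines : List (List Char)) : ∀ (dataAcc : List (List Bool)) (s : Int × Int) (x : Int),
    lines.foldl
      (fun (st : List (List Bool) × ((Int × Int) × Int)) value =>
        let ta := parseRowA st.2.2 value st.2.1
        (st.1 ++ [ta.1], (ta.2, st.2.2 + 1)))
      (dataAcc, (s, x))
    = (dataAcc ++ lines.map (fun line => line.map (fun c => !(c == '.' || c == 'S'))),
       ((PySem.List.enumerate lines x).foldl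
          (fun (s : Int × Int) (p : Int × List Char) =>
            let i := PySem.Chars.rfind p.2 ['S']
            if i = -1 then s else (p.1, i)) s,
        x + lines.length)) := by
  induction lines with
  | nil => intro dataAcc s x; simp [PySem.List.enumerate_nil]
  | cons v t ih =>
    intro dataAcc s x
    rw [List.foldl_cons, PySem.List.enumerate_cons, List.foldl_cons]
    simp only []
    rw [rowA_eq, ih, stepB_eq]
    refine Prod.ext ?_ (Prod.ext ?_ ?_)
    · simp
    · rfl
    · simp only [List.length_cons]
      push_cast; ring

-- ===== VERDICT (by name: the statement is the Claim_ definition above) =====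
theorem parse_spec : Claim_equal_parse := by
  intro puzzle_input _
  unfold Spec_parse parse parse_alt
  simp only []
  rw [outer_fold]
  simp
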